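-- pv_equiv track=rewrite | github.com/SamraAzizi/leetcode | easy/minimumCost.py | minimumCost
-- ===== SOURCE A (Python) =====
-- def minimumCost(nums):
--     """
--     :type nums: List[int]
--     :rtype: int
--     """
--     n = len(nums)
--     min_cost = float('inf')
--     for i in range(0, n-2):  # i can go up to n-3
--         for j in range(i+1, n-1):  # j can go up to n-2
--             cost = nums[0] + nums[i+1] + nums[j+1]
--             min_cost = min(min_cost, cost)
--     return min_cost
-- ===== SOURCE B (Python) =====
-- def minimumCost(nums):
--     """
--     :type nums: List[int]
--     :rtype: int
--     """
--     rest = sorted(nums[1:])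
--     return nums[0] + rest[0] + rest[1]
-- ===== Notes on version B (the rewrite author's own statement) =====
-- stated objective: simpler
-- what changed: Replaces the nested index loops taking a min over every pair with sorting the tail once and adding its first two elements (the two smallest).
-- outside the precondition, e.g. on minimumCost([1, 2]): A returns inf, B raises IndexError
import Mathlib
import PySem

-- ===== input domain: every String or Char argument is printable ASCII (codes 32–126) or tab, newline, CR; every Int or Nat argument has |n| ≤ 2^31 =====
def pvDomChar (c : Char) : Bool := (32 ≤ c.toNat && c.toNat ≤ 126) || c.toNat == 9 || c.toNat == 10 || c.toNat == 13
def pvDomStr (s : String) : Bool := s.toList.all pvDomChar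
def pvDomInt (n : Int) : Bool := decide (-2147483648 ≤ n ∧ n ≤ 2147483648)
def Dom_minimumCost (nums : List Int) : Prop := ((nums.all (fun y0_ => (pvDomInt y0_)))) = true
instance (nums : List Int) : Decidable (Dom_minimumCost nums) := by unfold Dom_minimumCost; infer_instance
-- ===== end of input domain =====

-- B replaces A's nested min-over-all-pairs loops by sorting the tail once and adding its two smallest elements.

-- ===== PORT A =====
-- min_cost = float('inf') is modeled by (none : Option Int); whenever the loop body runs
-- the indices 0, i+1, j+1 are in range, so pyGetD is exact there.
def minimumCost (nums : List Int) : Int :=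
  let n : Int := PySem.List.len nums
  let r : Option Int :=
    (PySem.List.pyRange 0 (n - 2) 1).foldl
      (fun acc i =>
        (PySem.List.pyRange (i + 1) (n - 1) 1).foldl
          (fun acc j =>
            let cost := PySem.List.pyGetD nums 0 0 + PySem.List.pyGetD nums (i + 1) 0
                        + PySem.List.pyGetD nums (j + 1) 0
            some (match acc with | none => cost | some m => min m cost)) acc)
      none
  -- under Pre_ (3 ≤ len) the loops ran, so r = some _ and the default is never observed
  r.getD 0

-- ===== PORT B =====
-- rest[0] / rest[1] raise IndexError in Python when len(nums) < 3; those inputs are outside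
-- Pre_, so pyGetD is exact on the claimed domain.
def minimumCost_alt (nums : List Int) : Int :=
  let rest := PySem.List.sorted (PySem.List.slice nums (some 1) none) id false
  PySem.List.pyGetD nums 0 0 + PySem.List.pyGetD rest 0 0 + PySem.List.pyGetD rest 1 0

-- ===== PRECONDITION & SPEC =====
-- Pre_ excludes lists with fewer than 3 elements: there A's loops never run and it returns
-- float('inf'), which is not an int, and B raises IndexError.
def Pre_minimumCost (nums : List Int) : Prop := 3 ≤ nums.length
instance (nums : List Int) : Decidable (Pre_minimumCost nums) := by unfold Pre_minimumCost; infer_instance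
def pvWitness_minimumCost : List Int := ([1, 2, 3] : List Int)

def Spec_minimumCost (nums : List Int) (out : Int) : Prop := out = minimumCost_alt nums
instance (nums : List Int) (out : Int) : Decidable (Spec_minimumCost nums out) := by unfold Spec_minimumCost; infer_instance

-- ===== CLAIM (what is proved, stated in full; the proofs are below) =====
def Claim_equal_minimumCost : Prop := ∀ (nums : List Int), Dom_minimumCost nums → Pre_minimumCost nums → Spec_minimumCost nums (minimumCost nums)

-- ===== LEMMAS AND PROOFS =====

-- one min-accumulation step of A's loop (none plays float('inf'))
def pvMinStep (acc : Option Int) (c : Int) : Option Int :=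
  some (match acc with | none => c | some m => min m c)

-- the list of all sums t[i] + t[j], i < j, in A's traversal order
def pairsums : List Int → List Int
  | [] => []
  | x :: xs => xs.map (fun z => x + z) ++ pairsums xs

theorem foldl_pvMinStep_some (l : List Int) (m : Int) :
    l.foldl pvMinStep (some m) = some (l.foldl min m) := by
  induction l generalizing m with
  | nil => rfl
  | cons x xs ih => simp [pvMinStep, ih]

theorem pvMinStep_comm (a : Option Int) (b c : Int) :
    pvMinStep (pvMinStep a b) c = pvMinStep (pvMinStep a c) b := by
  cases a <;> simp [pvMinStep, min_assoc, min_comm b c]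

theorem foldl_pvMinStep_perm {l₁ l₂ : List Int} (h : l₁.Perm l₂) (a : Option Int) :
    l₁.foldl pvMinStep a = l₂.foldl pvMinStep a := by
  induction h generalizing a with
  | nil => rfl
  | cons x _ ih => simp only [List.foldl_cons]; exact ih _
  | swap x y l => simp only [List.foldl_cons]; rw [pvMinStep_comm]
  | trans _ _ ih₁ ih₂ => rw [ih₁, ih₂]

theorem pairsums_perm {l₁ l₂ : List Int} (h : l₁.Perm l₂) :
    (pairsums l₁).Perm (pairsums l₂) := by
  induction h with
  | nil => exact List.Perm.refl _
  | cons x h ih => exact ((h.map _).append ih)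
  | swap x y l =>
      simp only [pairsums, List.map_cons, List.cons_append]
      rw [add_comm y x]
      refine List.Perm.cons _ ?_
      rw [← List.append_assoc, ← List.append_assoc]
      exact List.perm_append_comm.append_right _
  | trans _ _ ih₁ ih₂ => exact ih₁.trans ih₂

theorem foldl_min_eq_self (l : List Int) (a : Int) (h : ∀ x ∈ l, a ≤ x) :
    l.foldl min a = a := by
  induction l with
  | nil => rfl
  | cons x xs ih =>
      have hx : min a x = a := min_eq_left (h x (by simp))
      simp only [List.foldl_cons, hx]
      exact ih (fun y hy => h y (by simp [hy]))

theorem pairsums_lb (l : List Int) (hs : l.Pairwise (· ≤ ·)) (a b : Int)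
    (ha : ∀ x ∈ l, a ≤ x) (hb : ∀ x ∈ l.tail, b ≤ x) :
    ∀ y ∈ pairsums l, a + b ≤ y := by
  induction l with
  | nil => intro y hy; simp [pairsums] at hy
  | cons x xs ih =>
      intro y hy
      simp only [pairsums, List.mem_append, List.mem_map] at hy
      rcases hy with ⟨z, hz, rfl⟩ | hy
      · exact add_le_add (ha x (by simp)) (hb z hz)
      · exact ih (List.Pairwise.of_cons hs)
          (fun c hc => ha c (by simp [hc]))
          (fun c hc => hb c (List.mem_of_mem_tail hc))
          y hy

theorem pyGetD_cons_succ' (x : Int) (xs : List Int) (i : Int) (h0 : 0 ≤ i) (h1 : i < (xs.length : Int)) :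
    PySem.List.pyGetD (x :: xs) (i + 1) 0 = PySem.List.pyGetD xs i 0 := by
  rw [PySem.List.pyGetD_eq_getElem (x :: xs) 0 (by omega) (by simp; omega),
      PySem.List.pyGetD_eq_getElem xs 0 h0 (by simpa using h1)]
  have hnat : (i + 1).toNat = i.toNat + 1 := by omega
  simp [hnat]

theorem loop_eq (y : Int) (t : List Int) (acc : Option Int) :
    (PySem.List.pyRange 0 ((t.length : Int) - 1) 1).foldl
      (fun acc i => (PySem.List.pyRange (i + 1) (t.length : Int) 1).foldl
          (fun acc j => pvMinStep acc (y + PySem.List.pyGetD t i 0 + PySem.List.pyGetD t j 0)) acc) acc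
    = (pairsums t).foldl (fun a c => pvMinStep a (y + c)) acc := by
  induction t generalizing acc with
  | nil =>
      rw [PySem.List.pyRange_one_eq_nil (by simp)]
      rfl
  | cons z xs ih =>
      by_cases hxs : xs = []
      · subst hxs
        rw [PySem.List.pyRange_one_eq_nil (by simp)]
        simp [pairsums]
      · have hm : 0 < (xs.length : Int) := by
          have : xs.length ≠ 0 := fun h => hxs (List.length_eq_zero_iff.mp h)
          omega
        have hb : ((z :: xs).length : Int) - 1 = (xs.length : Int) := by
          simp
        rw [hb, PySem.List.pyRange_one_cons hm]
        simp only [List.foldl_cons]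
        -- the i = 0 block: fold over j ∈ [1, len (z::xs)) of y + (z::xs)[0] + (z::xs)[j]
        have h0blk :
            (PySem.List.pyRange (0 + 1) ((z :: xs).length : Int) 1).foldl
              (fun a j => pvMinStep a (y + PySem.List.pyGetD (z :: xs) 0 0 + PySem.List.pyGetD (z :: xs) j 0)) acc
            = xs.foldl (fun a w => pvMinStep a (y + z + w)) acc := by
          have := PySem.List.foldl_pyRange_pyGetD' (z :: xs) 0
            (fun a w => pvMinStep a (y + PySem.List.pyGetD (z :: xs) 0 0 + w)) acc
            (a := 0 + 1) (by omega)
          rw [this]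
          simp [PySem.List.pyGetD_zero_cons]
        rw [h0blk]
        simp only [zero_add]
        -- the remaining outer iterations i ∈ [1, len xs) shift to i ∈ [0, len xs - 1) over xs
        have hshift :
            (PySem.List.pyRange 1 (xs.length : Int) 1).foldl
              (fun acc i => (PySem.List.pyRange (i + 1) ((z :: xs).length : Int) 1).foldl
                  (fun a j => pvMinStep a (y + PySem.List.pyGetD (z :: xs) i 0 + PySem.List.pyGetD (z :: xs) j 0)) acc)
              (xs.foldl (fun a w => pvMinStep a (y + z + w)) acc)
            = (PySem.List.pyRange 0 ((xs.length : Int) - 1) 1).foldl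
              (fun acc i => (PySem.List.pyRange (i + 1) (xs.length : Int) 1).foldl
                  (fun a j => pvMinStep a (y + PySem.List.pyGetD xs i 0 + PySem.List.pyGetD xs j 0)) acc)
              (xs.foldl (fun a w => pvMinStep a (y + z + w)) acc) := by
          rw [PySem.List.pyRange_one 1 (xs.length : Int),
              PySem.List.pyRange_one 0 ((xs.length : Int) - 1)]
          have hsub : ((xs.length : Int) - 1 - 0).toNat = ((xs.length : Int) - 1).toNat := by omega
          rw [hsub, List.foldl_map, List.foldl_map]
          apply PySem.List.foldl_congr_mem
          intro a k hk
          have hk' : (k : Int) < (xs.length : Int) - 1 := by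
            have := List.mem_range.mp hk
            omega
          -- left inner fold = fold over elements (z::xs).drop (k+2) = xs.drop (k+1)
          have hL := PySem.List.foldl_pyRange_pyGetD' (z :: xs) 0
            (fun a w => pvMinStep a (y + PySem.List.pyGetD (z :: xs) (1 + (k : Int)) 0 + w)) a
            (a := 1 + (k : Int) + 1) (by omega)
          have hR := PySem.List.foldl_pyRange_pyGetD' xs 0
            (fun a w => pvMinStep a (y + PySem.List.pyGetD xs (0 + (k : Int)) 0 + w)) a
            (a := 0 + (k : Int) + 1) (by omega)
          rw [hL, hR]
          have h1 : ((1 : Int) + (k : Int) + 1).toNat = k + 2 := by omega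
          have h2 : ((0 : Int) + (k : Int) + 1).toNat = k + 1 := by omega
          rw [h1, h2]
          have hget : PySem.List.pyGetD (z :: xs) (1 + (k : Int)) 0 = PySem.List.pyGetD xs (0 + (k : Int)) 0 := by
            rw [add_comm (1 : Int) (k : Int)]
            have := pyGetD_cons_succ' z xs (k : Int) (by omega) (by omega)
            simpa using this
          rw [hget]
          rfl
        rw [hshift, ih]
        -- and the right-hand side folds the same way over pairsums (z :: xs)
        simp only [pairsums, List.foldl_append, List.foldl_map]
        congr 1
        exact PySem.List.foldl_congr_mem xs _ _ acc (fun a w _ => by rw [add_assoc])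

-- ===== VERDICT (by name: the statement is the Claim_ definition above) =====
theorem minimumCost_spec : Claim_equal_minimumCost := by
  intro nums _ hpre
  unfold Spec_minimumCost
  match nums, hpre with
  | y :: t, hpre =>
    have ht : 2 ≤ t.length := by
      simp only [Pre_minimumCost, List.length_cons] at hpre
      omega
    obtain ⟨s0, s1, rest, hsshape⟩ : ∃ s0 s1 rest, PySem.List.sorted t id false = s0 :: s1 :: rest := by
      cases hS : PySem.List.sorted t id false with
      | nil =>
          have hl := PySem.List.length_sorted t id false
          rw [hS] at hl; simp at hl; omega
      | cons a l =>
          cases l with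
          | nil =>
              have hl := PySem.List.length_sorted t id false
              rw [hS] at hl; simp at hl; omega
          | cons b r => exact ⟨a, b, r, rfl⟩
    -- sortedness facts about s0 :: s1 :: rest
    have hsort : (s0 :: s1 :: rest).Pairwise (· ≤ ·) := by
      have := PySem.List.sorted_pairwise t id
      rw [hsshape] at this
      simpa [id] using this
    have ha : ∀ x ∈ s0 :: s1 :: rest, s0 ≤ x := by
      intro x hx
      rcases List.mem_cons.mp hx with rfl | hx
      · exact le_refl _
      · exact (List.pairwise_cons.mp hsort).1 x hx
    have hb : ∀ x ∈ s1 :: rest, s1 ≤ x := by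
      intro x hx
      rcases List.mem_cons.mp hx with rfl | hx
      · exact le_refl _
      · exact (List.pairwise_cons.mp (List.pairwise_cons.mp hsort).2).1 x hx
    -- the B side
    have hB : minimumCost_alt (y :: t) = y + s0 + s1 := by
      simp only [minimumCost_alt, PySem.List.slice_from_one, List.tail_cons, hsshape,
        PySem.List.pyGetD_ofNat']
      simp
    -- the A side
    have e1 : PySem.List.len (y :: t) - 2 = (t.length : Int) - 1 := by
      simp [PySem.List.len_eq]; omega
    have e2 : PySem.List.len (y :: t) - 1 = (t.length : Int) := by
      simp [PySem.List.len_eq]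
    have hA : minimumCost (y :: t) = y + (s0 + s1) := by
      simp only [minimumCost, e1, e2]
      have hcong :
          (PySem.List.pyRange 0 ((t.length : Int) - 1) 1).foldl
            (fun acc i =>
              (PySem.List.pyRange (i + 1) (t.length : Int) 1).foldl
                (fun acc j =>
                  some (match acc with
                        | none => PySem.List.pyGetD (y :: t) 0 0 + PySem.List.pyGetD (y :: t) (i + 1) 0
                                  + PySem.List.pyGetD (y :: t) (j + 1) 0
                        | some m => min m (PySem.List.pyGetD (y :: t) 0 0 + PySem.List.pyGetD (y :: t) (i + 1) 0
                                  + PySem.List.pyGetD (y :: t) (j + 1) 0))) acc) (none : Option Int)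
          = (PySem.List.pyRange 0 ((t.length : Int) - 1) 1).foldl
            (fun acc i =>
              (PySem.List.pyRange (i + 1) (t.length : Int) 1).foldl
                (fun acc j => pvMinStep acc (y + PySem.List.pyGetD t i 0 + PySem.List.pyGetD t j 0)) acc)
            (none : Option Int) := by
        apply PySem.List.foldl_congr_mem
        intro acc i hi
        have hi' := PySem.List.mem_pyRange_one.mp hi
        apply PySem.List.foldl_congr_mem
        intro a j hj
        have hj' := PySem.List.mem_pyRange_one.mp hj
        rw [show PySem.List.pyGetD (y :: t) 0 0 = y from PySem.List.pyGetD_zero_cons y t 0,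
            pyGetD_cons_succ' y t i (by omega) (by omega),
            pyGetD_cons_succ' y t j (by omega) (by omega)]
        rfl
      rw [hcong, loop_eq]
      have hmap : ((pairsums t).map (fun c => y + c)).foldl pvMinStep none
          = (pairsums t).foldl (fun a c => pvMinStep a (y + c)) none := List.foldl_map
      rw [← hmap]
      have hperm : ((pairsums t).map (fun c => y + c)).Perm
          ((pairsums (s0 :: s1 :: rest)).map (fun c => y + c)) := by
        refine List.Perm.map _ ?_
        have := pairsums_perm (PySem.List.sorted_perm t id false).symm
        rwa [hsshape] at this
      rw [foldl_pvMinStep_perm hperm]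
      have hps : pairsums (s0 :: s1 :: rest)
          = (s0 + s1) :: (rest.map (fun z => s0 + z) ++ pairsums (s1 :: rest)) := by
        simp [pairsums]
      rw [hps]
      simp only [List.map_cons, List.foldl_cons]
      rw [show pvMinStep none (y + (s0 + s1)) = some (y + (s0 + s1)) from rfl,
          foldl_pvMinStep_some]
      have hlb : ∀ x ∈ (rest.map (fun z => s0 + z) ++ pairsums (s1 :: rest)).map (fun c => y + c),
          y + (s0 + s1) ≤ x := by
        intro x hx
        rcases List.mem_map.mp hx with ⟨c, hc, rfl⟩
        have hc' : c ∈ pairsums (s0 :: s1 :: rest) := by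
          rw [hps]; exact List.mem_cons_of_mem _ hc
        have := pairsums_lb (s0 :: s1 :: rest) hsort s0 s1 ha (by simpa using hb) c hc'
        omega
      rw [foldl_min_eq_self _ _ hlb]
      rfl
    rw [hA, hB]
    ring
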